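-- pv_equiv track=rewrite | github.com/SummerOneTwo/SZTU-autologin | utils/crypto.py | _sencode
-- ===== SOURCE A (Python) =====
-- def _ord_at(msg: str, idx: int) -> int:
--     if len(msg) > idx:
--         return ord(msg[idx])
--     return 0
--
-- def _sencode(msg: str, key: bool) -> list:
--     length = len(msg)
--     result = []
--     for i in range(0, length, 4):
--         result.append(
--             _ord_at(msg, i)
--             | _ord_at(msg, i + 1) << 8
--             | _ord_at(msg, i + 2) << 16
--             | _ord_at(msg, i + 3) << 24
--         )
--     if key:
--         result.append(length)
--     return result
-- ===== SOURCE B (Python) =====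
-- def _sencode(msg: str, key: bool) -> list:
--     length = len(msg)
--     result = [0] * ((length + 3) // 4)
--     for i, c in enumerate(msg):
--         result[i >> 2] |= ord(c) << ((i & 3) * 8)
--     if key:
--         result.append(length)
--     return result
-- ===== Notes on version B (the rewrite author's own statement) =====
-- stated objective: alternative
-- what changed: Replaces the stepped word loop with four guarded _ord_at lookups per word by a pre-sized zero word list filled in a single flat pass over the characters, OR-ing each char into its bucket by index arithmetic.
import Mathlib
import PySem

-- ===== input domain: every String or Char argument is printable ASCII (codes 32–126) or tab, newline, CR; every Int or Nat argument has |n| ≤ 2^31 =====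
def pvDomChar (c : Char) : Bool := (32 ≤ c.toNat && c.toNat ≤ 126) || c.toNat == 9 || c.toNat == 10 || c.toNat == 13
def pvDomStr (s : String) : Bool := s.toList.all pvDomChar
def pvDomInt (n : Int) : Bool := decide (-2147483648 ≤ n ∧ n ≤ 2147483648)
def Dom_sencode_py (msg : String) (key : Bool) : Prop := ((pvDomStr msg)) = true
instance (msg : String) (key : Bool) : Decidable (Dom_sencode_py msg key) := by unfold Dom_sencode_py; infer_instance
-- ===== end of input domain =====

-- B packs the characters in one flat pass into a pre-sized zero word list instead of A's
-- stepped word loop with four guarded lookups per word (objective: alternative decomposition).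

-- ===== PORT A =====
-- _ord_at(msg, idx); the 'none' arm is unreachable from _sencode (idx is always ≥ 0 there;
-- Python would raise IndexError only for idx < -len, which _sencode never passes).
def ordAtPy (l : List Char) (idx : Int) : Int :=
  if (l.length : Int) > idx then
    match PySem.List.pyGet? l idx with
    | some c => (c.toNat : Int)
    | none => 0
  else 0

def sencode_py (msg : String) (key : Bool) : List Int :=
  let l := msg.toList
  let length : Int := (l.length : Int)
  let result := (PySem.List.pyRange 0 length 4).foldl
    (fun res i =>
      res ++ [PySem.Int.bor (PySem.Int.bor (PySem.Int.bor
        (ordAtPy l i)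
        ((ordAtPy l (i + 1)) <<< (8 : Nat)))
        ((ordAtPy l (i + 2)) <<< (16 : Nat)))
        ((ordAtPy l (i + 3)) <<< (24 : Nat))]) []
  if key then result ++ [length] else result

-- ===== PORT B =====
-- the body of B's 'for i, c in enumerate(msg)' loop:  result[i >> 2] |= ord(c) << ((i & 3) * 8)
def bstep (res : List Int) (p : Int × Char) : List Int :=
  PySem.List.pySetD res (p.1 >>> (2 : Nat))
    (PySem.Int.bor (PySem.List.pyGetD res (p.1 >>> (2 : Nat)) 0)
      ((p.2.toNat : Int) <<< ((PySem.Int.band p.1 3) * 8).toNat))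

def sencode_py_alt (msg : String) (key : Bool) : List Int :=
  let l := msg.toList
  let length : Int := (l.length : Int)
  let result := (PySem.List.enumerate l 0).foldl bstep
    (List.replicate (PySem.Int.floordiv (length + 3) 4).toNat (0 : Int))
  if key then result ++ [length] else result

-- ===== PRECONDITION & SPEC =====
def Spec_sencode_py (msg : String) (key : Bool) (out : List Int) : Prop := out = sencode_py_alt msg key
instance (msg : String) (key : Bool) (out : List Int) : Decidable (Spec_sencode_py msg key out) := by unfold Spec_sencode_py; infer_instance

-- ===== CLAIM (what is proved, stated in full; the proofs are below) =====
def Claim_equal_sencode_py : Prop := ∀ (msg : String) (key : Bool), Dom_sencode_py msg key → Spec_sencode_py msg key (sencode_py msg key)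

-- ===== LEMMAS AND PROOFS =====

-- ord of the char at index i, 0 past the end (the unit both ports build words from)
def ordN (l : List Char) (i : Nat) : Nat := (l[i]?.map Char.toNat).getD 0

-- byte-slot j of word g, shifted as both ports shift it
def tm (l : List Char) (g j : Nat) : Nat := (ordN l (4 * g + j)) <<< (j * 8)

-- the finished word g
def wd (l : List Char) (g : Nat) : Nat := ((tm l g 0 ||| tm l g 1) ||| tm l g 2) ||| tm l g 3

-- word g after only the first k characters have been OR-ed in (B's loop invariant)
def tp (l : List Char) (k g j : Nat) : Nat := if 4 * g + j < k then tm l g j else 0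
def pw (l : List Char) (k g : Nat) : Nat := ((tp l k g 0 ||| tp l k g 1) ||| tp l k g 2) ||| tp l k g 3

lemma ordN_ge (l : List Char) (i : Nat) (h : l.length ≤ i) : ordN l i = 0 := by
  unfold ordN
  rw [List.getElem?_eq_none h]
  rfl

lemma pw_zero (l : List Char) (g : Nat) : pw l 0 g = 0 := by
  simp [pw, tp]

lemma pw_full (l : List Char) (g : Nat) : pw l l.length g = wd l g := by
  have h : ∀ j, tp l l.length g j = tm l g j := by
    intro j
    unfold tp
    split_ifs with hlt
    · rfl
    · unfold tm
      rw [show ordN l (4 * g + j) = 0 from ordN_ge l (4 * g + j) (by omega), Nat.zero_shiftLeft]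
  unfold pw wd
  rw [h 0, h 1, h 2, h 3]

lemma ordAtPy_natCast (l : List Char) (m : Nat) : ordAtPy l (m : Int) = (ordN l m : Int) := by
  unfold ordAtPy ordN
  by_cases h : m < l.length
  · rw [PySem.List.pyGet?_natCast, List.getElem?_eq_getElem h]
    simp [h]
  · rw [PySem.List.pyGet?_natCast, List.getElem?_eq_none (by omega), if_neg (by omega)]
    simp

-- A's word at start index 4*g equals ↑(wd l g)
lemma wordA_eq (l : List Char) (g : Nat) :
    PySem.Int.bor (PySem.Int.bor (PySem.Int.bor
      (ordAtPy l ((4 * g : Nat) : Int))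
      ((ordAtPy l (((4 * g : Nat) : Int) + 1)) <<< (8 : Nat)))
      ((ordAtPy l (((4 * g : Nat) : Int) + 2)) <<< (16 : Nat)))
      ((ordAtPy l (((4 * g : Nat) : Int) + 3)) <<< (24 : Nat)) = (wd l g : Int) := by
  have h1 : ((4 * g : Nat) : Int) + 1 = ((4 * g + 1 : Nat) : Int) := by push_cast; ring
  have h2 : ((4 * g : Nat) : Int) + 2 = ((4 * g + 2 : Nat) : Int) := by push_cast; ring
  have h3 : ((4 * g : Nat) : Int) + 3 = ((4 * g + 3 : Nat) : Int) := by push_cast; ring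
  rw [h1, h2, h3, ordAtPy_natCast, ordAtPy_natCast, ordAtPy_natCast, ordAtPy_natCast,
    ← Int.natCast_shiftLeft, ← Int.natCast_shiftLeft, ← Int.natCast_shiftLeft,
    PySem.Int.bor_natCast, PySem.Int.bor_natCast, PySem.Int.bor_natCast]
  simp [wd, tm]

lemma foldl_append_map {α β : Type} (f : α → β) :
    ∀ (xs : List α) (init : List β),
      xs.foldl (fun acc x => acc ++ [f x]) init = init ++ xs.map f := by
  intro xs
  induction xs with
  | nil => simp
  | cons x xs ih => intro init; simp [List.foldl_cons, ih]

lemma pw_succ_ne (l : List Char) (s g : Nat) (h : g ≠ s / 4) :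
    pw l (s + 1) g = pw l s g := by
  have key : ∀ j, j < 4 → tp l (s + 1) g j = tp l s g j := by
    intro j hj
    unfold tp
    have : 4 * g + j ≠ s := by omega
    split_ifs with h1 h2 h3 <;> first | rfl | omega
  unfold pw
  rw [key 0 (by omega), key 1 (by omega), key 2 (by omega), key 3 (by omega)]

lemma lor_insert (a b c d x m : Nat) (hm : m < 4)
    (hz : (if m = 0 then a else if m = 1 then b else if m = 2 then c else d) = 0) :
    (((a ||| (if 0 = m then x else 0)) ||| (b ||| (if 1 = m then x else 0))) |||
      (c ||| (if 2 = m then x else 0))) ||| (d ||| (if 3 = m then x else 0)) =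
    (((a ||| b) ||| c) ||| d) ||| x := by
  interval_cases m <;> simp_all <;>
    (apply Nat.eq_of_testBit_eq; intro i;
     simp [Nat.testBit_or, Bool.or_assoc, Bool.or_comm, Bool.or_left_comm])

lemma pw_succ_eq (l : List Char) (s : Nat) :
    pw l (s + 1) (s / 4) = pw l s (s / 4) ||| tm l (s / 4) (s % 4) := by
  have key : ∀ j, j < 4 →
      tp l (s + 1) (s / 4) j =
        tp l s (s / 4) j ||| (if j = s % 4 then tm l (s / 4) (s % 4) else 0) := by
    intro j _
    by_cases hje : j = s % 4
    · rw [hje]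
      unfold tp
      have h1 : 4 * (s / 4) + s % 4 = s := by omega
      rw [h1, if_pos (by omega), if_neg (by omega), if_pos rfl, Nat.zero_or]
    · unfold tp
      have he : (4 * (s / 4) + j < s + 1) ↔ (4 * (s / 4) + j < s) := by omega
      simp [hje, he]
  have hz : (if s % 4 = 0 then tp l s (s / 4) 0 else if s % 4 = 1 then tp l s (s / 4) 1
      else if s % 4 = 2 then tp l s (s / 4) 2 else tp l s (s / 4) 3) = 0 := by
    have hall : ∀ j, j = s % 4 → tp l s (s / 4) j = 0 := by
      intro j hj
      unfold tp
      have : ¬ (4 * (s / 4) + j < s) := by omega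
      simp [this]
    split_ifs with h0 h1 h2
    · exact hall 0 h0.symm
    · exact hall 1 h1.symm
    · exact hall 2 h2.symm
    · exact hall 3 (by omega)
  unfold pw
  rw [key 0 (by omega), key 1 (by omega), key 2 (by omega), key 3 (by omega)]
  exact lor_insert _ _ _ _ _ _ (by omega) hz

lemma set_map_range {β : Type} (W j : Nat) (f : Nat → β) (v : β) (_ : j < W) :
    ((List.range W).map f).set j v =
      (List.range W).map (fun g => if g = j then v else f g) := by
  apply List.ext_getElem
  · simp
  · intro i h1 h2
    simp only [List.getElem_set, List.getElem_map, List.getElem_range]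
    by_cases hij : j = i
    · simp [hij]
    · rw [if_neg hij, if_neg (fun h => hij h.symm)]

lemma getD_map_range' (W j : Nat) (f : Nat → Int) (h : j < W) :
    ((List.range W).map f).getD j 0 = f j := by
  simp [List.getD_eq_getElem?_getD, h]

-- one step of B's loop on the invariant state
lemma bstep_inv (l : List Char) (W s : Nat) (c : Char) (hsW : s / 4 < W)
    (hc : l[s]? = some c) :
    bstep ((List.range W).map (fun g => (pw l s g : Int))) ((s : Int), c) =
      (List.range W).map (fun g => (pw l (s + 1) g : Int)) := by
  have hord : c.toNat = ordN l s := by simp [ordN, hc]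
  have e1 : ((s : Int) >>> (2 : Nat)) = ((s / 4 : Nat) : Int) := by
    rw [← Int.natCast_shiftRight]; norm_num [Nat.shiftRight_eq_div_pow]
  have e2 : PySem.Int.band (s : Int) 3 = ((s % 4 : Nat) : Int) := by
    rw [show (3 : Int) = ((3 : Nat) : Int) by norm_num, PySem.Int.band_natCast]
    norm_cast
    simpa using Nat.and_two_pow_sub_one_eq_mod s 2
  have e3 : (((s % 4 : Nat) : Int) * 8).toNat = s % 4 * 8 := by omega
  unfold bstep
  simp only [e1, e2, e3, PySem.List.pySetD_natCast, PySem.List.pyGetD_natCast]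
  rw [getD_map_range' W (s / 4) _ hsW,
    show ((c.toNat : Int)) <<< (s % 4 * 8) = ((c.toNat <<< (s % 4 * 8) : Nat) : Int) from
      (Int.natCast_shiftLeft _ _).symm,
    PySem.Int.bor_natCast,
    set_map_range W (s / 4) _ _ hsW]
  apply List.map_congr_left
  intro g _
  by_cases hg : g = s / 4
  · subst hg
    rw [if_pos rfl, pw_succ_eq]
    congr 2
    rw [hord]
    unfold tm
    congr 2
    omega
  · rw [if_neg hg, pw_succ_ne l s g hg]

-- B's loop invariant: processing the chars from index s onward completes the pw-map
lemma bloop (l : List Char) (W : Nat) (hW : l.length ≤ 4 * W) :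
    ∀ (ds : List Char) (s : Nat), l.drop s = ds → s + ds.length = l.length →
      (PySem.List.enumerate ds (s : Int)).foldl bstep
        ((List.range W).map (fun g => (pw l s g : Int)))
      = (List.range W).map (fun g => (pw l l.length g : Int)) := by
  intro ds
  induction ds with
  | nil =>
    intro s h1 h2
    simp only [List.length_nil, Nat.add_zero] at h2
    rw [PySem.List.enumerate_nil, List.foldl_nil, h2]
  | cons c ds ih =>
    intro s h1 h2
    simp only [List.length_cons] at h2
    have hs : s < l.length := by omega
    have hsW : s / 4 < W := by omega
    have hc : l[s]? = some c := by
      have h0 : (l.drop s)[0]? = l[s + 0]? := List.getElem?_drop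
      rw [h1] at h0
      simpa using h0.symm
    rw [PySem.List.enumerate_cons, List.foldl_cons,
      bstep_inv l W s c hsW hc,
      show ((s : Int)) + 1 = (((s + 1 : Nat)) : Int) by push_cast; ring]
    apply ih (s + 1)
    · have hd := congrArg (List.drop 1) h1
      simpa [List.drop_drop] using hd
    · omega

-- ===== VERDICT (by name: the statement is the Claim_ definition above) =====
theorem sencode_py_spec : Claim_equal_sencode_py := by
  intro msg key _
  unfold Spec_sencode_py
  simp only [sencode_py, sencode_py_alt]
  set l := msg.toList with hl
  set n := l.length with hn
  set W := (n + 3) / 4 with hWdef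
  have hW : n ≤ 4 * W := by omega
  have hN : (if (0 : Int) < (n : Int) then (((n : Int) - 0 + 4 - 1) / 4).toNat else 0) = W := by
    split_ifs with h <;> omega
  -- A's side: the pyRange fold is the wd-map
  have hA : (PySem.List.pyRange 0 (n : Int) 4).foldl
      (fun res i =>
        res ++ [PySem.Int.bor (PySem.Int.bor (PySem.Int.bor
          (ordAtPy l i)
          ((ordAtPy l (i + 1)) <<< (8 : Nat)))
          ((ordAtPy l (i + 2)) <<< (16 : Nat)))
          ((ordAtPy l (i + 3)) <<< (24 : Nat))]) [] =
      (List.range W).map (fun g => (wd l g : Int)) := by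
    rw [PySem.List.pyRange_of_pos 0 (n : Int) (by norm_num), hN, List.foldl_map,
      foldl_append_map, List.nil_append]
    apply List.map_congr_left
    intro g _
    have hc : (0 : Int) + 4 * (g : Int) = ((4 * g : Nat) : Int) := by push_cast; ring
    simp only [hc]
    exact wordA_eq l g
  -- B's side: the enumerate fold over the zero word list is the wd-map too
  have hrep : List.replicate (PySem.Int.floordiv ((n : Int) + 3) 4).toNat (0 : Int) =
      (List.range W).map (fun g => (pw l 0 g : Int)) := by
    have h1 : (PySem.Int.floordiv ((n : Int) + 3) 4).toNat = W := by
      rw [show ((n : Int) + 3) = ((n + 3 : Nat) : Int) by push_cast; ring,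
        show (4 : Int) = ((4 : Nat) : Int) by norm_num,
        PySem.Int.floordiv_natCast]
      omega
    rw [h1]
    have h2 : ∀ g, (pw l 0 g : Int) = 0 := by intro g; rw [pw_zero]; norm_num
    simp only [h2]
    simp [List.map_const']
  have hb := bloop l W hW l 0 List.drop_zero (by omega)
  norm_num at hb
  have hB : (PySem.List.enumerate l 0).foldl bstep
      (List.replicate (PySem.Int.floordiv ((n : Int) + 3) 4).toNat (0 : Int)) =
      (List.range W).map (fun g => (wd l g : Int)) := by
    rw [hrep, hb]
    apply List.map_congr_left
    intro g _
    rw [← hn, pw_full]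
  rw [hA, hB]
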